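-- pv_equiv track=rewrite | github.com/KevinPham-BME-Prog/CCPS109-lab-upload | labs109(1).py | domino_cycle
-- ===== SOURCE A (Python) =====
-- def domino_cycle(tiles):
--   x = 0
--   if len(tiles) == 1:
--     return tiles[0][0] == tiles [0][1]
--   elif len(tiles) == 0:
--     return True
--   else:
--     while x <= (len(tiles)-2):
--       if tiles[x][1] == tiles[x+1][0]:
--         x += 1
--       else:
--         return False
--     if tiles[0][0] == tiles[-1][1]:
--       return True
--     else:
--       return False
-- ===== SOURCE B (Python) =====
-- def domino_cycle(tiles):
--     firsts = [a for a, _ in tiles]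
--     seconds = [b for _, b in tiles]
--     return seconds == firsts[1:] + firsts[:1]
-- ===== Notes on version B (the rewrite author's own statement) =====
-- stated objective: simpler
-- what changed: Replaces the length-case analysis and indexed while-loop by comparing the list of second halves against a one-step left rotation of the list of first halves, which covers all lengths uniformly.
import Mathlib
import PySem

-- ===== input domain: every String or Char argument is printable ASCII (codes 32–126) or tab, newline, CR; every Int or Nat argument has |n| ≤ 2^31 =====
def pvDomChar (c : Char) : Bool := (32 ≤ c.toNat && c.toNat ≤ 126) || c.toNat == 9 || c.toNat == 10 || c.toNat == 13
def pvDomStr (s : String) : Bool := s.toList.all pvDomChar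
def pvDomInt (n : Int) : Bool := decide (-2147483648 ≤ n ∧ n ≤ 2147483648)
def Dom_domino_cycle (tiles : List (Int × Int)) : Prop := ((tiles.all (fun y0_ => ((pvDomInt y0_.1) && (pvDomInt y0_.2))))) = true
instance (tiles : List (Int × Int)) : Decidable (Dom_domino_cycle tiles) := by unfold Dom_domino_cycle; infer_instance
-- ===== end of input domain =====

-- B replaces A's length-case analysis and indexed while-loop by comparing the seconds
-- against a one-step left rotation of the firsts (objective: simpler).

-- ===== PORT A =====
-- the while loop: 'x <= len(tiles)-2' — this branch is only reached with len(tiles) ≥ 2,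
-- where it is exactly 'x + 2 ≤ tiles.length'; in-range tiles[x] is pyGetD with an unused default
def domino_cycle_loop (tiles : List (Int × Int)) (x : Nat) : Bool :=
  if x + 2 ≤ tiles.length then
    if (PySem.List.pyGetD tiles (x : Int) (0, 0)).2 == (PySem.List.pyGetD tiles ((x : Int) + 1) (0, 0)).1 then
      domino_cycle_loop tiles (x + 1)
    else false
  else
    if (PySem.List.pyGetD tiles 0 (0, 0)).1 == (PySem.List.pyGetD tiles (-1) (0, 0)).2 then true
    else false
termination_by tiles.length - x

def domino_cycle (tiles : List (Int × Int)) : Bool :=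
  if tiles.length = 1 then
    (PySem.List.pyGetD tiles 0 (0, 0)).1 == (PySem.List.pyGetD tiles 0 (0, 0)).2
  else if tiles.length = 0 then true
  else domino_cycle_loop tiles 0

-- ===== PORT B =====
def domino_cycle_alt (tiles : List (Int × Int)) : Bool :=
  let firsts := tiles.map Prod.fst
  let seconds := tiles.map Prod.snd
  seconds == PySem.List.slice firsts (some 1) none ++ PySem.List.slice firsts none (some 1)

-- ===== PRECONDITION & SPEC =====
def Spec_domino_cycle (tiles : List (Int × Int)) (out : Bool) : Prop := out = domino_cycle_alt tiles
instance (tiles : List (Int × Int)) (out : Bool) : Decidable (Spec_domino_cycle tiles out) := by unfold Spec_domino_cycle; infer_instance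

-- ===== CLAIM (what is proved, stated in full; the proofs are below) =====
def Claim_equal_domino_cycle : Prop := ∀ (tiles : List (Int × Int)), Dom_domino_cycle tiles → Spec_domino_cycle tiles (domino_cycle tiles)

-- ===== LEMMAS AND PROOFS =====

/-- Common reference form: walk the chain once, remembering the very first head `a`. -/
def dcChk (a : Int) : Int → List (Int × Int) → Bool
  | cur, [] => cur == a
  | cur, (c, d) :: r => (cur == c) && dcChk a d r

/-- Adjacency of consecutive tiles, structurally. -/
def dcAdj : List (Int × Int) → Bool
  | (_, b₂) :: (c₁, c₂) :: r => (b₂ == c₁) && dcAdj ((c₁, c₂) :: r)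
  | _ => true

/-- Second component of the last tile, with default. -/
def dcLastSnd : Int → List (Int × Int) → Int
  | d, [] => d
  | _, (_, f) :: r => dcLastSnd f r

theorem dcDecideAnd (p q : Prop) [Decidable p] [Decidable q] :
    decide (p ∧ q) = (decide p && decide q) := by
  by_cases hp : p <;> by_cases hq : q <;> simp [hp, hq]

theorem dcBeqComm (a b : Int) : (a == b) = (b == a) := by
  by_cases h : a = b
  · simp [h]
  · simp [h, Ne.symm h]

theorem dcAdj_cons_cons (p q : Int × Int) (r : List (Int × Int)) :
    dcAdj (p :: q :: r) = ((p.2 == q.1) && dcAdj (q :: r)) := by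
  obtain ⟨_, _⟩ := p; obtain ⟨_, _⟩ := q; rfl

theorem dcAdj_short (l : List (Int × Int)) (hl : l.length ≤ 1) : dcAdj l = true := by
  match l with
  | [] => rfl
  | [p] => obtain ⟨_, _⟩ := p; rfl
  | p :: q :: r => simp at hl

theorem dcChk_cons (a cur : Int) (p : Int × Int) (r : List (Int × Int)) :
    dcChk a cur (p :: r) = ((cur == p.1) && dcChk a p.2 r) := by
  obtain ⟨_, _⟩ := p; rfl

theorem dcLastSnd_cons (d : Int) (p : Int × Int) (r : List (Int × Int)) :
    dcLastSnd d (p :: r) = dcLastSnd p.2 r := by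
  obtain ⟨_, _⟩ := p; rfl

theorem dcLastSnd_eq_getLast (b : Int) (p : Int × Int) (r : List (Int × Int)) :
    dcLastSnd b (p :: r) = ((p :: r).getLast (by simp)).2 := by
  induction r generalizing b p with
  | nil => simp [dcLastSnd]
  | cons q r ih => rw [dcLastSnd_cons, show dcLastSnd p.2 (q :: r) = _ from ih p.2 q]; simp

theorem dcChk_eq_rot (r : List (Int × Int)) (a cur : Int) :
    decide (cur :: r.map Prod.snd = r.map Prod.fst ++ [a]) = dcChk a cur r := by
  induction r generalizing cur with
  | nil =>
    rw [decide_eq_decide.mpr (show (cur :: ([] : List (Int × Int)).map Prod.snd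
      = ([] : List (Int × Int)).map Prod.fst ++ [a]) ↔ cur = a by simp)]
    rfl
  | cons p r ih =>
    rw [decide_eq_decide.mpr (show (cur :: ((p :: r).map Prod.snd)
        = (p :: r).map Prod.fst ++ [a])
        ↔ (cur = p.1 ∧ p.2 :: r.map Prod.snd = r.map Prod.fst ++ [a]) by simp),
      dcDecideAnd, ih p.2, dcChk_cons]
    rfl

theorem dcChk_eq_adj (r : List (Int × Int)) (a c d : Int) :
    (dcAdj ((c, d) :: r) && decide (a = dcLastSnd d r)) = dcChk a d r := by
  induction r generalizing c d with
  | nil =>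
    show (true && decide (a = d)) = (d == a)
    rw [Bool.true_and]
    exact (dcBeqComm d a).symm
  | cons p r ih =>
    rw [dcAdj_cons_cons, dcLastSnd_cons (d := d), dcChk_cons, Bool.and_assoc]
    show _ = ((d == p.1) && dcChk a p.2 r)
    rw [show dcAdj (p :: r) = dcAdj ((p.1, p.2) :: r) by rfl, ih p.1 p.2]

theorem domino_cycle_loop_eq (tiles : List (Int × Int)) (x : Nat) (hx : x + 1 ≤ tiles.length) :
    domino_cycle_loop tiles x =
      (dcAdj (tiles.drop x) &&
        ((PySem.List.pyGetD tiles 0 (0, 0)).1 == (PySem.List.pyGetD tiles (-1) (0, 0)).2)) := by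
  by_cases h : x + 2 ≤ tiles.length
  · have hx1 : x < tiles.length := by omega
    have hx2 : x + 1 < tiles.length := by omega
    have hd : tiles.drop x = tiles[x] :: tiles[x + 1] :: tiles.drop (x + 2) := by
      rw [List.drop_eq_getElem_cons hx1, List.drop_eq_getElem_cons hx2]
    have hd1 : tiles.drop (x + 1) = tiles[x + 1] :: tiles.drop (x + 2) :=
      List.drop_eq_getElem_cons hx2
    rw [domino_cycle_loop]
    simp only [h, if_true]
    rw [PySem.List.pyGetD_natCast, show ((x : Int) + 1) = ((x + 1 : Nat) : Int) by push_cast; ring,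
      PySem.List.pyGetD_natCast, List.getD_eq_getElem _ _ hx1, List.getD_eq_getElem _ _ hx2, hd,
      dcAdj_cons_cons]
    by_cases hc : tiles[x].2 = tiles[x + 1].1
    · simp only [hc, beq_self_eq_true, if_true, Bool.true_and]
      rw [domino_cycle_loop_eq tiles (x + 1) (by omega), hd1]
    · have hvp : (tiles[x].2 == tiles[x + 1].1) = false := by simpa using hc
      rw [hvp, Bool.false_and, Bool.false_and]
      simp
  · rw [domino_cycle_loop]
    simp only [h, if_false]
    rw [dcAdj_short _ (by simp; omega), Bool.true_and]
    split <;> simp_all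
termination_by tiles.length - x

-- ===== VERDICT (by name: the statement is the Claim_ definition above) =====
theorem domino_cycle_spec : Claim_equal_domino_cycle := by
  intro tiles _
  unfold Spec_domino_cycle domino_cycle domino_cycle_alt
  match tiles with
  | [] => decide
  | [(a, b)] =>
    show ((PySem.List.pyGetD [(a, b)] 0 ((0 : Int), (0 : Int))).1
        == (PySem.List.pyGetD [(a, b)] 0 ((0 : Int), (0 : Int))).2)
      = (([(a, b)].map Prod.snd)
        == (PySem.List.slice ([(a, b)].map Prod.fst) (some 1) none
            ++ PySem.List.slice ([(a, b)].map Prod.fst) none (some 1)))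
    rw [PySem.List.slice_from_one]
    rw [show PySem.List.slice ([(a, b)].map Prod.fst) none (some 1)
        = ([(a, b)].map Prod.fst).take 1 from by
      rw [show (1 : Int) = ((1 : Nat) : Int) by norm_num, PySem.List.slice_to_natCast]]
    rw [show PySem.List.pyGetD [(a, b)] 0 ((0 : Int), (0 : Int)) = (a, b) from by
      rw [PySem.List.pyGetD_zero]; rfl]
    show (a == b) = (([b] : List Int) == [a])
    rw [show (([b] : List Int) == [a]) = (b == a) by
      show (b == a && ([] == ([] : List Int))) = (b == a); simp]
    exact dcBeqComm a b
  | (a, b) :: (c, d) :: r =>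
    have hlen1 : ((a, b) :: (c, d) :: r).length ≠ 1 := by simp
    have hlen0 : ((a, b) :: (c, d) :: r).length ≠ 0 := by simp
    rw [if_neg hlen1, if_neg hlen0]
    rw [domino_cycle_loop_eq _ 0 (by simp)]
    have hne : ((a, b) :: (c, d) :: r) ≠ [] := by simp
    rw [PySem.List.pyGetD_neg_one _ _ hne,
      show PySem.List.pyGetD ((a, b) :: (c, d) :: r) 0 ((0 : Int), (0 : Int)) = (a, b) from by
        rw [PySem.List.pyGetD_zero]; rfl,
      show (((a, b) :: (c, d) :: r).getLast hne).2 = dcLastSnd b ((c, d) :: r) from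
        (by rw [dcLastSnd_eq_getLast b (c, d) r]; simp [List.getLast_cons])]
    simp only [List.drop_zero]
    rw [dcAdj_cons_cons, dcLastSnd_cons]
    show (((b == c) && dcAdj ((c, d) :: r)) && (a == dcLastSnd d r))
      = (((a, b) :: (c, d) :: r).map Prod.snd
        == (PySem.List.slice (((a, b) :: (c, d) :: r).map Prod.fst) (some 1) none
            ++ PySem.List.slice (((a, b) :: (c, d) :: r).map Prod.fst) none (some 1)))
    rw [PySem.List.slice_from_one]
    rw [show PySem.List.slice (((a, b) :: (c, d) :: r).map Prod.fst) none (some 1)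
        = (((a, b) :: (c, d) :: r).map Prod.fst).take 1 from by
      rw [show (1 : Int) = ((1 : Nat) : Int) by norm_num, PySem.List.slice_to_natCast]]
    rw [Bool.and_assoc, show (a == dcLastSnd d r) = decide (a = dcLastSnd d r) from rfl,
      dcChk_eq_adj r a c d, show ((b == c) && dcChk a d r) = dcChk a b ((c, d) :: r) from
        (dcChk_cons a b (c, d) r).symm]
    show dcChk a b ((c, d) :: r)
      = ((b :: ((c, d) :: r).map Prod.snd) == (((c, d) :: r).map Prod.fst ++ [a]))
    rw [show ((b :: ((c, d) :: r).map Prod.snd) == (((c, d) :: r).map Prod.fst ++ [a]))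
        = decide (b :: ((c, d) :: r).map Prod.snd = ((c, d) :: r).map Prod.fst ++ [a]) from by
      rw [Bool.beq_eq_decide_eq]]
    rw [dcChk_eq_rot]
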